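-- pv_equiv track=rewrite | github.com/swyoo5/BaekJoon | 프로그래머스/unrated/181923. 수열과 구간 쿼리 2/수열과 구간 쿼리 2.py | solution
-- ===== SOURCE A (Python) =====
-- def solution(arr, queries):
--     answer = [-1 for _ in range(len(queries))]
--     for idx, query in enumerate(queries) :
--         start, end, small = query[0], query[1], query[2]
--         sub_arr = sorted(arr[start : end + 1])
--         for num in sub_arr :
--             if num > small :
--                 answer[idx] = num
--                 break
--
--     return answer
-- ===== SOURCE B (Python) =====
-- def solution(arr, queries):
--     answer = []
--     for query in queries:
--         start, end, small = query[0], query[1], query[2]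
--         best = None
--         for num in arr[start : end + 1]:
--             if num > small and (best is None or num < best):
--                 best = num
--         answer.append(-1 if best is None else best)
--     return answer
-- ===== Notes on version B (the rewrite author's own statement) =====
-- stated objective: faster
-- what changed: Per query, instead of sorting the slice and scanning for the first element above the threshold, B does one linear pass over the slice keeping the smallest element greater than the threshold.
import Mathlib
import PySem

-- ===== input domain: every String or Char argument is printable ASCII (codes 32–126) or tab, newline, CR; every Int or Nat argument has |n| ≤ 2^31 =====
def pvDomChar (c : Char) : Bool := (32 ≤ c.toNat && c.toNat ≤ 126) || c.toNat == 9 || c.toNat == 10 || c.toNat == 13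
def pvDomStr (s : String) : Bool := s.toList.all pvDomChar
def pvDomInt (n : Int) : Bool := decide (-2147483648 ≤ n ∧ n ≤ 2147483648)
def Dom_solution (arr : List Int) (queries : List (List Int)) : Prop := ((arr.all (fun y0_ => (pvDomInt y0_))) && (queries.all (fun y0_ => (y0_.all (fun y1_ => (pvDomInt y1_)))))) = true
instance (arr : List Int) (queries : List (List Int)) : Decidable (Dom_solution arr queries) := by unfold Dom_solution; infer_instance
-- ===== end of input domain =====

-- B replaces A's per-query sort-then-scan by a single linear pass keeping the smallest
-- element greater than the threshold (different algorithm; return values proved equal).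

-- ===== PORT A =====
-- A's inner 'for num in sub_arr: if num > small: answer[idx] = num; break' with default -1
def firstGtA (small : Int) : List Int → Int
  | [] => -1
  | x :: xs => if small < x then x else firstGtA small xs

def solution (arr : List Int) (queries : List (List Int)) : List Int :=
  queries.map (fun query =>
    let start := PySem.List.pyGetD query 0 0
    let stop := PySem.List.pyGetD query 1 0
    let small := PySem.List.pyGetD query 2 0
    firstGtA small
      (PySem.List.sorted (PySem.List.slice arr (some start) (some (stop + 1))) (fun x => x) false))

-- ===== PORT B =====
-- B's inner 'if num > small and (best is None or num < best): best = num'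
def stepB (small : Int) (best : Option Int) (num : Int) : Option Int :=
  match best with
  | none => if small < num then some num else none
  | some m => if small < num ∧ num < m then some num else some m

def solution_alt (arr : List Int) (queries : List (List Int)) : List Int :=
  queries.map (fun query =>
    let start := PySem.List.pyGetD query 0 0
    let stop := PySem.List.pyGetD query 1 0
    let small := PySem.List.pyGetD query 2 0
    (((PySem.List.slice arr (some start) (some (stop + 1))).foldl (stepB small) none).getD (-1)))

-- ===== PRECONDITION & SPEC =====
-- Pre_ excludes exactly the queries shorter than 3 entries, on which Python A (and B) raises IndexError.
def Pre_solution (arr : List Int) (queries : List (List Int)) : Prop :=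
  ∀ q ∈ queries, 3 ≤ q.length
instance (arr : List Int) (queries : List (List Int)) : Decidable (Pre_solution arr queries) := by unfold Pre_solution; infer_instance

def pvWitness_solution : List Int × List (List Int) := ([1, 2, 3], [[0, 2, 1]])

def Spec_solution (arr : List Int) (queries : List (List Int)) (out : List Int) : Prop := out = solution_alt arr queries
instance (arr : List Int) (queries : List (List Int)) (out : List Int) : Decidable (Spec_solution arr queries out) := by unfold Spec_solution; infer_instance

-- ===== CLAIM (what is proved, stated in full; the proofs are below) =====
def Claim_equal_solution : Prop := ∀ (arr : List Int) (queries : List (List Int)), Dom_solution arr queries → Pre_solution arr queries → Spec_solution arr queries (solution arr queries)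

-- ===== LEMMAS AND PROOFS =====

-- option-min: combine a running best with the min of the remaining filtered elements
def omin (a? b? : Option Int) : Option Int :=
  match a? with
  | none => b?
  | some m => some (b?.elim m (min m))

theorem omin_none_right (a? : Option Int) : omin a? none = a? := by
  cases a? <;> rfl

theorem omin_assoc (a? b? c? : Option Int) : omin (omin a? b?) c? = omin a? (omin b? c?) := by
  cases a? <;> cases b? <;> cases c? <;> simp [omin, min_assoc]

theorem min?_cons_omin (x : Int) (xs : List Int) : (x :: xs).min? = omin (some x) xs.min? := by
  rw [List.min?_cons]; rfl

theorem stepB_eq_omin (s : Int) (b : Option Int) (x : Int) :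
    stepB s b x = if s < x then omin b (some x) else b := by
  cases b with
  | none => simp [stepB, omin]
  | some m =>
    by_cases hs : s < x
    · by_cases hm : x < m
      · simp [stepB, omin, hs, hm, min_eq_right (le_of_lt hm)]
      · simp [stepB, omin, hs, hm, min_eq_left (le_of_not_gt hm)]
    · simp [stepB, hs]

theorem foldl_stepB (s : Int) (l : List Int) (b : Option Int) :
    l.foldl (stepB s) b = omin b ((l.filter (fun x => decide (s < x))).min?) := by
  induction l generalizing b with
  | nil => simp [omin_none_right]
  | cons x xs ih =>
    by_cases hs : s < x
    · simp only [List.foldl_cons, ih, List.filter_cons, hs, decide_true, if_true,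
        min?_cons_omin, stepB_eq_omin, ← omin_assoc]
    · simp [List.foldl_cons, ih, hs, stepB_eq_omin]

theorem min?_eq_some_head (a : Int) (l : List Int) (h : ∀ y ∈ l, a ≤ y) :
    (a :: l).min? = some a := by
  rw [List.min?_eq_some_iff]
  constructor
  · simp
  · intro b hb
    rcases List.mem_cons.mp hb with h1 | h2
    · omega
    · exact h b h2

-- first element > s of a (≤)-sorted list is the min of the elements > s (default -1)
theorem firstGtA_sorted (s : Int) (t : List Int) (hp : t.Pairwise (· ≤ ·)) :
    firstGtA s t = ((t.filter (fun x => decide (s < x))).min?).getD (-1) := by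
  induction t with
  | nil => rfl
  | cons x xs ih =>
    rcases List.pairwise_cons.mp hp with ⟨hle, htail⟩
    by_cases hs : s < x
    · have : ∀ y ∈ xs.filter (fun x => decide (s < x)), x ≤ y :=
        fun y hy => hle y (List.mem_of_mem_filter hy)
      simp [firstGtA, hs, min?_eq_some_head x _ this]
    · simp [firstGtA, hs, ih htail]

theorem min?_perm (l₁ l₂ : List Int) (h : l₁.Perm l₂) : l₁.min? = l₂.min? := by
  cases h2 : l₂.min? with
  | none =>
    rw [List.min?_eq_none_iff] at h2 ⊢
    subst h2; exact h.eq_nil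
  | some a =>
    rw [List.min?_eq_some_iff] at h2 ⊢
    exact ⟨h.mem_iff.mpr h2.1, fun b hb => h2.2 b (h.mem_iff.mp hb)⟩

-- the per-query equality: A's value on any list l equals B's value on l
theorem perQuery (s : Int) (l : List Int) :
    firstGtA s (PySem.List.sorted l (fun x => x) false) = (l.foldl (stepB s) none).getD (-1) := by
  rw [firstGtA_sorted s _ (PySem.List.sorted_pairwise l (fun x => x)), foldl_stepB]
  have hperm : ((PySem.List.sorted l (fun x => x) false).filter (fun x => decide (s < x))).Perm
      (l.filter (fun x => decide (s < x))) := (PySem.List.sorted_perm l (fun x => x) false).filter _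
  rw [min?_perm _ _ hperm]
  rfl

-- ===== VERDICT (by name: the statement is the Claim_ definition above) =====
theorem solution_spec : Claim_equal_solution := by
  intro _arr queries _ _
  unfold Spec_solution solution solution_alt
  exact List.map_congr_left (fun q _ => perQuery _ _)
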